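-- pv_equiv track=rewrite | github.com/abrahamshimekt/Competitive-Programming-Problem-Solutions | queens_attack_the_king/queens_atack.py | move_right_up
-- ===== SOURCE A (Python) =====
-- def move_right_up(queens_set,king):
--
--     row = king[0] -1
--     col = king[1]+1
--
--     while row > -1 and col < 8:
--         if (row,col) in queens_set:
--             return [row,col]
--         else:
--             row -=1
--             col +=1
--
--     return []
-- ===== SOURCE B (Python) =====
-- def move_right_up(queens_set, king):
--     s = king[0] + king[1]
--     best = None
--     for q in queens_set:
--         if q[0] + q[1] == s and 0 <= q[0] < king[0] and king[1] < q[1] <= 7: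
--             if best is None or q[0] > best[0]:
--                 best = q
--     return [best[0], best[1]] if best is not None else []
-- ===== Notes on version B (the rewrite author's own statement) =====
-- stated objective: alternative
-- what changed: B replaces A's cell-by-cell walk along the up-right diagonal by a single filter-and-select pass over queens_set, keeping the qualifying queen with the largest row (nearest to the king).
import Mathlib
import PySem

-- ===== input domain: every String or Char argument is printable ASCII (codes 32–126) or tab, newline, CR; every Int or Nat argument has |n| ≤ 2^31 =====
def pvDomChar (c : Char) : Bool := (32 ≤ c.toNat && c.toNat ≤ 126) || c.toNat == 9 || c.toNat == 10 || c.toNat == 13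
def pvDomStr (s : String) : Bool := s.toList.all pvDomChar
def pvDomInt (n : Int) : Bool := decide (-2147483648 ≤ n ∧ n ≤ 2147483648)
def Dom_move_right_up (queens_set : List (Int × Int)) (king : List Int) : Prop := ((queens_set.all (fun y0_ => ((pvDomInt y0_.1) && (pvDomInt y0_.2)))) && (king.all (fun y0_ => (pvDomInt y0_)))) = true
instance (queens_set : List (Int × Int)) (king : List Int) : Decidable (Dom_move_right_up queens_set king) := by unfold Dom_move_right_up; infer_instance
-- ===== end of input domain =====

-- B replaces A's cell-by-cell walk up the diagonal by one filter-and-select pass over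
-- queens_set, keeping the qualifying queen with the largest row (the one nearest the king).

-- ===== PORT A =====
-- the while loop of A, recursing on the decreasing row
def pvWalkA (queens_set : List (Int × Int)) (row col : Int) : List Int :=
  if _h : row > -1 ∧ col < 8 then
    if (row, col) ∈ queens_set then [row, col]
    else pvWalkA queens_set (row - 1) (col + 1)
  else []
termination_by (row + 1).toNat
decreasing_by omega

def move_right_up (queens_set : List (Int × Int)) (king : List Int) : List Int :=
  match PySem.List.pyGet? king 0, PySem.List.pyGet? king 1 with
  | some k0, some k1 => pvWalkA queens_set (k0 - 1) (k1 + 1)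
  | _, _ => []  -- unreachable under Pre_ (Python raises IndexError)

-- ===== PORT B =====
def move_right_up_alt (queens_set : List (Int × Int)) (king : List Int) : List Int :=
  match PySem.List.pyGet? king 0 with
  | none => []  -- unreachable under Pre_
  | some k0 =>
  match PySem.List.pyGet? king 1 with
  | none => []  -- unreachable under Pre_
  | some k1 =>
    let s := k0 + k1
    let best := queens_set.foldl (fun b q =>
      if q.1 + q.2 = s ∧ 0 ≤ q.1 ∧ q.1 < k0 ∧ k1 < q.2 ∧ q.2 ≤ 7 then
        match b with
        | none => some q
        | some p => if q.1 > p.1 then some q else b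
      else b) none
    match best with
    | some p => [p.1, p.2]
    | none => []

-- ===== PRECONDITION & SPEC =====
-- Pre_ excludes exactly the inputs where Python A raises IndexError on king[0]/king[1].
def Pre_move_right_up (queens_set : List (Int × Int)) (king : List Int) : Prop :=
  2 ≤ king.length
instance (queens_set : List (Int × Int)) (king : List Int) : Decidable (Pre_move_right_up queens_set king) := by unfold Pre_move_right_up; infer_instance

def pvWitness_move_right_up : (List (Int × Int)) × List Int := ([(2, 3), (0, 5)], [4, 1])

def Spec_move_right_up (queens_set : List (Int × Int)) (king : List Int) (out : List Int) : Prop := out = move_right_up_alt queens_set king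
instance (queens_set : List (Int × Int)) (king : List Int) (out : List Int) : Decidable (Spec_move_right_up queens_set king out) := by unfold Spec_move_right_up; infer_instance

-- ===== CLAIM (what is proved, stated in full; the proofs are below) =====
def Claim_equal_move_right_up : Prop := ∀ (queens_set : List (Int × Int)) (king : List Int), Dom_move_right_up queens_set king → Pre_move_right_up queens_set king → Spec_move_right_up queens_set king (move_right_up queens_set king)

-- ===== LEMMAS AND PROOFS =====

-- the step of B's fold, with the bound on rows expressed as 'q.1 ≤ r'
def pvStep (s r : Int) (b : Option (Int × Int)) (q : Int × Int) : Option (Int × Int) :=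
  if q.1 + q.2 = s ∧ 0 ≤ q.1 ∧ q.1 ≤ r ∧ q.2 ≤ 7 then
    match b with
    | none => some q
    | some p => if q.1 > p.1 then some q else b
  else b

theorem pvStep_none (s r : Int) (qs : List (Int × Int))
    (h : ∀ q ∈ qs, ¬ (q.1 + q.2 = s ∧ 0 ≤ q.1 ∧ q.1 ≤ r ∧ q.2 ≤ 7)) :
    qs.foldl (pvStep s r) none = none := by
  induction qs with
  | nil => rfl
  | cons q qs ih =>
    simp only [List.foldl_cons]
    rw [pvStep, if_neg (h q (by simp))]
    exact ih (fun q hq => h q (by simp [hq]))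

-- running the fold from 'some t' yields some p with t.1 ≤ p.1
theorem pvFold_some (s r : Int) (qs : List (Int × Int)) :
    ∀ t : Int × Int, ∃ p, qs.foldl (pvStep s r) (some t) = some p ∧ t.1 ≤ p.1 := by
  induction qs with
  | nil => intro t; exact ⟨t, rfl, le_refl _⟩
  | cons q qs ih =>
    intro t
    simp only [List.foldl_cons, pvStep]
    split
    · split
      · obtain ⟨p, hp, hle⟩ := ih q
        exact ⟨p, hp, by omega⟩
      · exact ih t
    · exact ih t

-- any qualifying member forces the fold to return a queen with at least its row
theorem pvFold_hit (s r : Int) (qs : List (Int × Int)) (q : Int × Int)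
    (hq : q ∈ qs) (hc : q.1 + q.2 = s ∧ 0 ≤ q.1 ∧ q.1 ≤ r ∧ q.2 ≤ 7) :
    ∀ b : Option (Int × Int), ∃ p, qs.foldl (pvStep s r) b = some p ∧ q.1 ≤ p.1 := by
  induction qs with
  | nil => cases hq
  | cons x qs ih =>
    intro b
    simp only [List.foldl_cons]
    rcases List.mem_cons.mp hq with h | h
    · subst h
      simp only [pvStep]
      rw [if_pos hc]
      cases b with
      | none => exact pvFold_some s r qs q
      | some p =>
        dsimp only
        by_cases hgt : q.1 > p.1
        · rw [if_pos hgt]; exact pvFold_some s r qs q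
        · rw [if_neg hgt]
          obtain ⟨p', hp', hle⟩ := pvFold_some s r qs p
          exact ⟨p', hp', by omega⟩
    · exact ih h _

-- the fold's result is a queen of the list satisfying the condition (when started from none)
theorem pvFold_mem (s r : Int) (qs : List (Int × Int)) :
    ∀ b p, qs.foldl (pvStep s r) b = some p →
      (p ∈ qs ∧ (p.1 + p.2 = s ∧ 0 ≤ p.1 ∧ p.1 ≤ r ∧ p.2 ≤ 7)) ∨ b = some p := by
  induction qs with
  | nil => intro b p h; exact Or.inr h
  | cons q qs ih =>
    intro b p h
    simp only [List.foldl_cons] at h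
    rcases ih _ _ h with ⟨hm, hc⟩ | hb
    · exact Or.inl ⟨List.mem_cons_of_mem _ hm, hc⟩
    · simp only [pvStep] at hb
      split at hb
      · cases b with
        | none =>
          dsimp only at hb
          simp only [Option.some.injEq] at hb; subst hb
          exact Or.inl ⟨List.mem_cons_self, by assumption⟩
        | some t =>
          dsimp only at hb
          split at hb
          · simp only [Option.some.injEq] at hb; subst hb
            exact Or.inl ⟨List.mem_cons_self, by assumption⟩
          · exact Or.inr hb
      · exact Or.inr hb

-- the bound r = row can be lowered to row - 1 when (row, s - row) is not among the queens
theorem pvFold_drop (s row : Int) (qs : List (Int × Int)) (hnm : (row, s - row) ∉ qs) :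
    qs.foldl (pvStep s row) none = qs.foldl (pvStep s (row - 1)) none := by
  apply PySem.List.foldl_congr_mem
  intro b q hq
  unfold pvStep
  have hne : ¬ (q.1 + q.2 = s ∧ q.1 = row) := by
    rintro ⟨h1, h2⟩
    apply hnm
    have : q = (row, s - row) := by
      cases q; simp_all; omega
    rwa [this] at hq
  by_cases h : q.1 + q.2 = s ∧ 0 ≤ q.1 ∧ q.1 ≤ row - 1 ∧ q.2 ≤ 7
  · rw [if_pos h, if_pos ⟨h.1, h.2.1, by omega, h.2.2.2⟩]
  · rw [if_neg h, if_neg (by intro hc; exact h ⟨hc.1, hc.2.1, by omega, hc.2.2.2⟩)]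

-- characterization of A's walk as a best-queen selection
theorem pvWalkA_eq (qs : List (Int × Int)) (s row col : Int) (hs : s = row + col) :
    pvWalkA qs row col =
      (match qs.foldl (pvStep s row) none with
       | some p => [p.1, p.2]
       | none => []) := by
  by_cases hcond : row > -1 ∧ col < 8
  · by_cases hmem : (row, col) ∈ qs
    · rw [pvWalkA, dif_pos hcond, if_pos hmem]
      obtain ⟨p, hp, hle⟩ := pvFold_hit s row qs (row, col) hmem
        ⟨by omega, by omega, le_refl _, by omega⟩ none
      rw [hp]
      rcases pvFold_mem _ _ qs none p hp with ⟨_, hc⟩ | h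
      · have h1 : p.1 = row := le_antisymm hc.2.2.1 hle
        have h2 : p.2 = col := by omega
        simp [h1, h2]
      · cases h
    · rw [pvWalkA, dif_pos hcond, if_neg hmem]
      rw [pvWalkA_eq qs s (row - 1) (col + 1) (by omega)]
      rw [pvFold_drop s row qs (by simpa [show s - row = col by omega] using hmem)]
  · rw [pvWalkA, dif_neg hcond]
    rw [pvStep_none]
    intro q _ hc
    omega
termination_by (row + 1).toNat
decreasing_by omega

-- B's fold condition coincides with pvStep's at s = k0 + k1, r = k0 - 1
theorem pvAlt_fold (k0 k1 : Int) (qs : List (Int × Int)) :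
    qs.foldl (fun b q =>
      if q.1 + q.2 = k0 + k1 ∧ 0 ≤ q.1 ∧ q.1 < k0 ∧ k1 < q.2 ∧ q.2 ≤ 7 then
        match b with
        | none => some q
        | some p => if q.1 > p.1 then some q else b
      else b) none = qs.foldl (pvStep (k0 + k1) (k0 - 1)) none := by
  apply PySem.List.foldl_congr_mem
  intro b q _
  unfold pvStep
  by_cases h : q.1 + q.2 = k0 + k1 ∧ 0 ≤ q.1 ∧ q.1 ≤ k0 - 1 ∧ q.2 ≤ 7
  · rw [if_pos h, if_pos ⟨h.1, h.2.1, by omega, by omega, h.2.2.2⟩]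
  · rw [if_neg (by intro hc; exact h ⟨hc.1, hc.2.1, by omega, hc.2.2.2.2⟩), if_neg h]

-- ===== VERDICT (by name: the statement is the Claim_ definition above) =====
theorem move_right_up_spec : Claim_equal_move_right_up := by
  intro qs king _ hpre
  unfold Pre_move_right_up at hpre
  match king with
  | [] => simp at hpre
  | [_] => simp at hpre
  | k0 :: k1 :: rest =>
    unfold Spec_move_right_up move_right_up move_right_up_alt
    have h0 : PySem.List.pyGet? (k0 :: k1 :: rest) 0 = some k0 :=
      PySem.List.pyGet?_zero_cons _ _
    have h1 : PySem.List.pyGet? (k0 :: k1 :: rest) 1 = some k1 := by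
      simp [PySem.List.pyGet?, PySem.List.pyIdx?]
    rw [h0, h1]
    simp only
    rw [pvAlt_fold, pvWalkA_eq qs (k0 + k1) (k0 - 1) (k1 + 1) (by ring)]
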